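-- pv_equiv track=rewrite | github.com/rnagumo/atcoder_tips | scripts/others/product.py | solution_n2
-- ===== SOURCE A (Python) =====
-- def solution_n2(x, n):
--     res = 1
--     for i in range(n):
--         prod = 1
--         for j in range(i, n):
--             prod *= x[j]
--             res *= prod
--     return res
-- ===== SOURCE B (Python) =====
-- def solution_n2(x, n):
--     # closed form: x[k] occurs in (k+1)*(n-k) subarray products; one pass with fast pow
--     res = 1
--     for k in range(n):
--         res *= pow(x[k], (k + 1) * (n - k))
--     return res
-- ===== Notes on version B (the rewrite author's own statement) =====
-- stated objective: alternative
-- what changed: Replaced the nested loop over all subarray products by a single pass that raises each x[k] to its closed-form multiplicity (k+1)*(n-k) with pow; fewer multiplications, though both are dominated by the giant big-int result.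
import Mathlib
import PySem

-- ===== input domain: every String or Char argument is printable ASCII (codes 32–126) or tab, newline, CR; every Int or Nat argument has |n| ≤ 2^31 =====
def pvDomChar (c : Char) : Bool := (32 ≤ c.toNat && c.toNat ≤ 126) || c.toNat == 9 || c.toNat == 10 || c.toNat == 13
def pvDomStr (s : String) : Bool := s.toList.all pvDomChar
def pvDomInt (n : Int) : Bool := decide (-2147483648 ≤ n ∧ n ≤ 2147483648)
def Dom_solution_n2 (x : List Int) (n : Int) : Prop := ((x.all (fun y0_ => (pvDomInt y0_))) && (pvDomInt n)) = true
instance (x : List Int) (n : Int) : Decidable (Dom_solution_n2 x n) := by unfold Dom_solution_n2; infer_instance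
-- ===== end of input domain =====

-- B replaces A's nested subarray loop by a single pass computing x[k]^((k+1)*(n-k)) via pow (a different, closed-form-exponent algorithm).

-- ===== PORT A =====
def solution_n2 (x : List Int) (n : Int) : Int :=
  (PySem.List.pyRange 0 n 1).foldl
    (fun res i =>
      ((PySem.List.pyRange i n 1).foldl
        (fun (st : Int × Int) j =>
          (st.1 * PySem.List.pyGetD x j 0, st.2 * (st.1 * PySem.List.pyGetD x j 0)))
        (1, res)).2)
    1

-- ===== PORT B =====
def solution_n2_alt (x : List Int) (n : Int) : Int :=
  (PySem.List.pyRange 0 n 1).foldl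
    (fun res k => res * (PySem.List.pyGetD x k 0) ^ ((k + 1) * (n - k)).toNat)
    1

-- ===== PRECONDITION & SPEC =====
-- Pre_ excludes n > len(x), on which the Python A (and B) raise IndexError.
def Pre_solution_n2 (x : List Int) (n : Int) : Prop := n ≤ (x.length : Int)
instance (x : List Int) (n : Int) : Decidable (Pre_solution_n2 x n) := by unfold Pre_solution_n2; infer_instance
def pvWitness_solution_n2 : List Int × Int := ([2, -3, 5], 3)

def Spec_solution_n2 (x : List Int) (n : Int) (out : Int) : Prop := out = solution_n2_alt x n
instance (x : List Int) (n : Int) (out : Int) : Decidable (Spec_solution_n2 x n out) := by unfold Spec_solution_n2; infer_instance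

-- ===== CLAIM (what is proved, stated in full; the proofs are below) =====
def Claim_equal_solution_n2 : Prop := ∀ (x : List Int) (n : Int), Dom_solution_n2 x n → Pre_solution_n2 x n → Spec_solution_n2 x n (solution_n2 x n)

-- ===== LEMMAS AND PROOFS =====

-- x[j] with default 0 (indices used are always in range under Pre_, so the default is never taken)
def pvF (x : List Int) (j : Int) : Int := PySem.List.pyGetD x j 0

-- product of x over a list of indices
def pvPf (x : List Int) (l : List Int) : Int := (l.map (pvF x)).prod

-- the factor A's inner loop (starting with prod = p) multiplies into res over index list l
def pvT (x : List Int) (p : Int) : List Int → Int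
  | [] => 1
  | j :: t => (p * pvF x j) * pvT x (p * pvF x j) t

theorem pvT_append (x : List Int) (l : List Int) (p j : Int) :
    pvT x p (l ++ [j]) = pvT x p l * (p * pvPf x l * pvF x j) := by
  induction l generalizing p with
  | nil => simp [pvT, pvPf]
  | cons a t ih => simp [pvT, ih, pvPf, mul_assoc, mul_comm, mul_left_comm]

theorem pv_inner (x : List Int) (l : List Int) (p r : Int) :
    l.foldl
      (fun (st : Int × Int) j =>
        (st.1 * PySem.List.pyGetD x j 0, st.2 * (st.1 * PySem.List.pyGetD x j 0)))
      (p, r) = (p * pvPf x l, r * pvT x p l) := by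
  induction l generalizing p r with
  | nil => simp [pvPf, pvT]
  | cons a t ih =>
      simp only [List.foldl_cons, ih]
      simp [pvPf, pvT, pvF, mul_assoc]

theorem pv_outer (x : List Int) (n : Int) (l : List Int) (r : Int) :
    l.foldl
      (fun res i =>
        ((PySem.List.pyRange i n 1).foldl
          (fun (st : Int × Int) j =>
            (st.1 * PySem.List.pyGetD x j 0, st.2 * (st.1 * PySem.List.pyGetD x j 0)))
          (1, res)).2)
      r = r * (l.map (fun i => pvT x 1 (PySem.List.pyRange i n 1))).prod := by
  induction l generalizing r with
  | nil => simp
  | cons a t ih =>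
      simp only [List.foldl_cons]
      rw [ih]
      simp [pv_inner]
      ring

theorem pv_foldl_mul (g : Int → Int) (l : List Int) (r : Int) :
    l.foldl (fun res k => res * g k) r = r * (l.map g).prod := by
  induction l generalizing r with
  | nil => simp
  | cons a t ih => simp [ih, mul_assoc]

-- C(m) = CR(m): sum-of-prefix products identity
theorem pv_C (x : List Int) (m : Nat) :
    ((PySem.List.pyRange 0 (m : Int) 1).map
        (fun i => pvPf x (PySem.List.pyRange i (m : Int) 1))).prod
    = ((PySem.List.pyRange 0 (m : Int) 1).map
        (fun t => pvF x t ^ (t + 1).toNat)).prod := by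
  induction m with
  | zero => simp
  | succ m ih =>
      have hsplit : PySem.List.pyRange 0 ((m : Int) + 1) 1
          = PySem.List.pyRange 0 (m : Int) 1 ++ [(m : Int)] :=
        PySem.List.pyRange_one_succ_right (by positivity)
      have hlen : (PySem.List.pyRange 0 (m : Int) 1).length = m := by
        simp [PySem.List.length_pyRange_one]
      push_cast
      rw [hsplit]
      rw [List.map_append, List.map_append, List.prod_append, List.prod_append]
      have hL : ((PySem.List.pyRange 0 (m : Int) 1).map
            (fun i => pvPf x (PySem.List.pyRange i ((m : Int) + 1) 1))).prod
          = ((PySem.List.pyRange 0 (m : Int) 1).map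
            (fun i => pvPf x (PySem.List.pyRange i (m : Int) 1) * pvF x (m : Int))).prod := by
        apply congrArg
        apply List.map_congr_left
        intro i hi
        have hi' := (PySem.List.mem_pyRange_one).1 hi
        rw [PySem.List.pyRange_one_succ_right (by omega : i ≤ (m : Int))]
        simp [pvPf]
      rw [hL, List.prod_map_mul]
      have hconst : ((PySem.List.pyRange 0 (m : Int) 1).map (fun _ => pvF x (m : Int))).prod
          = pvF x (m : Int) ^ m := by
        rw [List.map_const', List.prod_replicate, hlen]
      rw [hconst, ih]
      have he : ((m : Int) + 1).toNat = m + 1 := by omega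
      simp [PySem.List.pyRange_one_singleton, pvPf, he, pow_succ]
      ring

theorem pv_main (x : List Int) (m : Nat) :
    ((PySem.List.pyRange 0 (m : Int) 1).map
        (fun i => pvT x 1 (PySem.List.pyRange i (m : Int) 1))).prod
    = ((PySem.List.pyRange 0 (m : Int) 1).map
        (fun k => pvF x k ^ ((k + 1) * ((m : Int) - k)).toNat)).prod := by
  induction m with
  | zero => simp
  | succ m ih =>
      have hsplit : PySem.List.pyRange 0 ((m : Int) + 1) 1
          = PySem.List.pyRange 0 (m : Int) 1 ++ [(m : Int)] :=
        PySem.List.pyRange_one_succ_right (by positivity)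
      have hlen : (PySem.List.pyRange 0 (m : Int) 1).length = m := by
        simp [PySem.List.length_pyRange_one]
      push_cast
      rw [hsplit, List.map_append, List.map_append, List.prod_append, List.prod_append]
      -- LHS head terms
      have hL : ((PySem.List.pyRange 0 (m : Int) 1).map
            (fun i => pvT x 1 (PySem.List.pyRange i ((m : Int) + 1) 1))).prod
          = ((PySem.List.pyRange 0 (m : Int) 1).map
            (fun i => pvT x 1 (PySem.List.pyRange i (m : Int) 1)
              * (pvPf x (PySem.List.pyRange i (m : Int) 1) * pvF x (m : Int)))).prod := by
        apply congrArg
        apply List.map_congr_left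
        intro i hi
        have hi' := (PySem.List.mem_pyRange_one).1 hi
        rw [PySem.List.pyRange_one_succ_right (by omega : i ≤ (m : Int)),
          pvT_append]
        ring
      -- RHS head terms: exponent split
      have hR : ((PySem.List.pyRange 0 (m : Int) 1).map
            (fun k => pvF x k ^ ((k + 1) * ((m : Int) + 1 - k)).toNat)).prod
          = ((PySem.List.pyRange 0 (m : Int) 1).map
            (fun k => pvF x k ^ ((k + 1) * ((m : Int) - k)).toNat
              * pvF x k ^ (k + 1).toNat)).prod := by
        apply congrArg
        apply List.map_congr_left
        intro k hk
        have hk' := (PySem.List.mem_pyRange_one).1 hk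
        rw [← pow_add]
        congr 1
        have h1 : (k + 1) * ((m : Int) + 1 - k) = (k + 1) * ((m : Int) - k) + (k + 1) := by ring
        have h2 : 0 ≤ (k + 1) * ((m : Int) - k) := by
          apply mul_nonneg <;> omega
        omega
      rw [hL, hR, List.prod_map_mul, List.prod_map_mul, ih]
      have hconst : ((PySem.List.pyRange 0 (m : Int) 1).map (fun _ => pvF x (m : Int))).prod
          = pvF x (m : Int) ^ m := by
        rw [List.map_const', List.prod_replicate, hlen]
      rw [List.prod_map_mul, hconst, pv_C x m]
      simp [PySem.List.pyRange_one_singleton, pvT, pow_succ]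
      ring

theorem pv_ports_eq (x : List Int) (n : Int) : solution_n2 x n = solution_n2_alt x n := by
  unfold solution_n2 solution_n2_alt
  by_cases h : n ≤ 0
  · rw [PySem.List.pyRange_one_eq_nil h]
    simp
  · push Not at h
    obtain ⟨m, hm⟩ : ∃ m : Nat, n = (m : Int) := ⟨n.toNat, by omega⟩
    subst hm
    rw [pv_outer, pv_foldl_mul, one_mul, one_mul, pv_main]
    apply congrArg
    apply List.map_congr_left
    intro k _
    simp [pvF]

-- ===== VERDICT (by name: the statement is the Claim_ definition above) =====
theorem solution_n2_spec : Claim_equal_solution_n2 := by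
  intro x n _ _
  unfold Spec_solution_n2
  exact pv_ports_eq x n
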